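-- pv_equiv track=rewrite | github.com/Raha-R8/Threes_game | part5.py | count_zero_left
-- ===== SOURCE A (Python) =====
-- n = 4
--
-- def count_zero_left(mat,k1,d1,n1=n-1):
--     count = -1
--     count_index = -1
--     dc = {}
--     for i in mat:
--         count_index+=1
--         a=i[n1]
--         if a==0:
--             count+=1
--             dc[count] = count_index
--     m = count+1
--     zero_num = k1%m
--     for j in dc.keys():
--         if j==zero_num:
--             change = dc[j]
--     mat[change][n1] = d1
--     return mat
-- ===== SOURCE B (Python) =====
-- n = 4
--
-- def count_zero_left(mat, k1, d1, n1=n-1):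
--     total = 0
--     for row in mat:
--         if row[n1] == 0:
--             total += 1
--     zero_num = k1 % total
--     j = -1
--     for row in mat:
--         if row[n1] == 0:
--             j += 1
--             if j == zero_num:
--                 row[n1] = d1
--                 break
--     return mat
-- ===== Notes on version B (the rewrite author's own statement) =====
-- stated objective: simpler
-- what changed: B drops A's dict of zero-positions and its key-scan: one pass counts the zeros in column n1, a second pass walks to the zero_num-th zero and sets it in place, stopping early.
import Mathlib
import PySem

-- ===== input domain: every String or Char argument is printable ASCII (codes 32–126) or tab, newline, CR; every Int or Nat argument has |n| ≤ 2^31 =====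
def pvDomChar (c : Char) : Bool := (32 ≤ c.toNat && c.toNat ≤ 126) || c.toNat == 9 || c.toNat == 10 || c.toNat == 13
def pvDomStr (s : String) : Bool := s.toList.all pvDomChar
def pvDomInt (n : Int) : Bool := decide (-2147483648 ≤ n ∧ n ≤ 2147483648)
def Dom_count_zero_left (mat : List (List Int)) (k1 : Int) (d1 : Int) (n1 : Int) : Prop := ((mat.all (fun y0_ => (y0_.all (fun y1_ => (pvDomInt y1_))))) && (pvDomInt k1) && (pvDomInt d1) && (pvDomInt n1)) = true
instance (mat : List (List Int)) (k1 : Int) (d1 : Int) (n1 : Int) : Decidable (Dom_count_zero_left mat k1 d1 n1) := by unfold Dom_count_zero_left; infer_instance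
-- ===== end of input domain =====

-- B replaces A's dict of zero-positions and key-scan by two direct passes (count the zeros, then
-- walk to the zero_num-th zero and set it, stopping early); both mutate mat in place in Python —
-- the equivalence proved here is about the returned value.

-- ===== PORT A =====
-- the body of A's first loop; i[n1]: Python raises IndexError when out of range; `.getD 0` is junk there, excluded by Pre_
def czlF (n1 : Int) : (Int × Int × PySem.Dict Int Int) → List Int → (Int × Int × PySem.Dict Int Int) :=
  fun st i =>
    let count_index := st.2.1 + 1
    let a := (PySem.List.pyGet? i n1).getD 0
    if a == 0 then (st.1 + 1, count_index, PySem.Dict.insert st.2.2 (st.1 + 1) count_index)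
    else (st.1, count_index, st.2.2)

def count_zero_left (mat : List (List Int)) (k1 : Int) (d1 : Int) (n1 : Int) : List (List Int) :=
  let st := mat.foldl (czlF n1) (-1, -1, PySem.Dict.empty)
  let count := st.1
  let dc := st.2.2
  let m := count + 1
  let zero_num := PySem.Int.mod k1 m   -- k1 % 0 raises ZeroDivisionError in Python; excluded by Pre_
  -- `change` stays unbound (NameError) only when zero_num is not a key, impossible under Pre_; 0 is junk there
  let change := (PySem.Dict.keys dc).foldl (fun ch j => if j == zero_num then PySem.Dict.getD dc j 0 else ch) 0
  PySem.List.pySetD mat change (PySem.List.pySetD (PySem.List.pyGetD mat change []) n1 d1)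

-- ===== PORT B =====
def czlAltGo (d1 n1 zero_num : Int) (rows : List (List Int)) (j : Int) : List (List Int) :=
  match rows with
  | [] => []
  | r :: rs =>
    if (PySem.List.pyGet? r n1).getD 0 == 0 then
      if j + 1 == zero_num then PySem.List.pySetD r n1 d1 :: rs
      else r :: czlAltGo d1 n1 zero_num rs (j + 1)
    else r :: czlAltGo d1 n1 zero_num rs j

def count_zero_left_alt (mat : List (List Int)) (k1 : Int) (d1 : Int) (n1 : Int) : List (List Int) :=
  let total := mat.foldl (fun c r => if (PySem.List.pyGet? r n1).getD 0 == 0 then c + 1 else c) (0 : Int)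
  let zero_num := PySem.Int.mod k1 total
  czlAltGo d1 n1 zero_num mat (-1)

-- ===== PRECONDITION & SPEC =====
-- Pre_ excludes exactly the inputs where Python A raises: a row where mat[i][n1] is an IndexError,
-- and matrices with no zero in column n1 (then k1 % 0 is a ZeroDivisionError).
def Pre_count_zero_left (mat : List (List Int)) (k1 : Int) (d1 : Int) (n1 : Int) : Prop :=
  (∀ r ∈ mat, PySem.Raise.InRange r.length n1) ∧
  0 < mat.countP (fun r => (PySem.List.pyGet? r n1).getD 0 == 0)
instance (mat : List (List Int)) (k1 : Int) (d1 : Int) (n1 : Int) : Decidable (Pre_count_zero_left mat k1 d1 n1) := by unfold Pre_count_zero_left; infer_instance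
def pvWitness_count_zero_left : List (List Int) × Int × Int × Int := ([[1, 0], [0, 5]], 3, 7, 1)
def Spec_count_zero_left (mat : List (List Int)) (k1 : Int) (d1 : Int) (n1 : Int) (out : List (List Int)) : Prop := out = count_zero_left_alt mat k1 d1 n1
instance (mat : List (List Int)) (k1 : Int) (d1 : Int) (n1 : Int) (out : List (List Int)) : Decidable (Spec_count_zero_left mat k1 d1 n1 out) := by unfold Spec_count_zero_left; infer_instance

-- ===== CLAIM (what is proved, stated in full; the proofs are below) =====
def Claim_equal_count_zero_left : Prop := ∀ (mat : List (List Int)) (k1 : Int) (d1 : Int) (n1 : Int), Dom_count_zero_left mat k1 d1 n1 → Pre_count_zero_left mat k1 d1 n1 → Spec_count_zero_left mat k1 d1 n1 (count_zero_left mat k1 d1 n1)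

-- ===== LEMMAS AND PROOFS =====

-- number of zeros of column n1 in rows (as an Int)
def czlCnt (n1 : Int) (rows : List (List Int)) : Int :=
  (rows.countP (fun r => (PySem.List.pyGet? r n1).getD 0 == 0) : Int)

-- index (relative to base b; A starts its count_index at -1) of the z-th zero row
def czlIdx (n1 : Int) (rows : List (List Int)) (z : Int) (b : Int) : Int :=
  match rows with
  | [] => b
  | r :: rs =>
    if (PySem.List.pyGet? r n1).getD 0 == 0 then
      if z = 0 then b + 1 else czlIdx n1 rs (z - 1) (b + 1)
    else czlIdx n1 rs z (b + 1)

-- set the z-th zero row's column n1 to d1 (common form of both results)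
def czlSet (d1 n1 : Int) (rows : List (List Int)) (z : Int) : List (List Int) :=
  match rows with
  | [] => []
  | r :: rs =>
    if (PySem.List.pyGet? r n1).getD 0 == 0 then
      if z = 0 then PySem.List.pySetD r n1 d1 :: rs else r :: czlSet d1 n1 rs (z - 1)
    else r :: czlSet d1 n1 rs z

theorem czlCnt_nil (n1 : Int) : czlCnt n1 [] = 0 := rfl

theorem czlCnt_cons (n1 : Int) (r : List Int) (rs : List (List Int)) :
    czlCnt n1 (r :: rs) =
      (if (PySem.List.pyGet? r n1).getD 0 == 0 then 1 else 0) + czlCnt n1 rs := by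
  by_cases h : ((PySem.List.pyGet? r n1).getD 0 == 0) = true <;>
    simp [czlCnt, List.countP_cons, h] <;> push_cast <;> ring

theorem czlIdx_cons_pos0 (n1 : Int) (r : List Int) (rs : List (List Int)) (b : Int)
    (hp : ((PySem.List.pyGet? r n1).getD 0 == 0) = true) :
    czlIdx n1 (r :: rs) 0 b = b + 1 := by
  simp [czlIdx, hp]

theorem czlIdx_cons_pos (n1 : Int) (r : List Int) (rs : List (List Int)) (z b : Int)
    (hp : ((PySem.List.pyGet? r n1).getD 0 == 0) = true) (hz : z ≠ 0) :
    czlIdx n1 (r :: rs) z b = czlIdx n1 rs (z - 1) (b + 1) := by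
  simp [czlIdx, hp, hz]

theorem czlIdx_cons_neg (n1 : Int) (r : List Int) (rs : List (List Int)) (z b : Int)
    (hp : ¬ ((PySem.List.pyGet? r n1).getD 0 == 0) = true) :
    czlIdx n1 (r :: rs) z b = czlIdx n1 rs z (b + 1) := by
  simp [czlIdx, hp]

theorem czlSet_cons_pos0 (d1 n1 : Int) (r : List Int) (rs : List (List Int))
    (hp : ((PySem.List.pyGet? r n1).getD 0 == 0) = true) :
    czlSet d1 n1 (r :: rs) 0 = PySem.List.pySetD r n1 d1 :: rs := by
  simp [czlSet, hp]

theorem czlSet_cons_pos (d1 n1 : Int) (r : List Int) (rs : List (List Int)) (z : Int)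
    (hp : ((PySem.List.pyGet? r n1).getD 0 == 0) = true) (hz : z ≠ 0) :
    czlSet d1 n1 (r :: rs) z = r :: czlSet d1 n1 rs (z - 1) := by
  simp [czlSet, hp, hz]

theorem czlSet_cons_neg (d1 n1 : Int) (r : List Int) (rs : List (List Int)) (z : Int)
    (hp : ¬ ((PySem.List.pyGet? r n1).getD 0 == 0) = true) :
    czlSet d1 n1 (r :: rs) z = r :: czlSet d1 n1 rs z := by
  simp [czlSet, hp]

theorem czlIdx_shift (n1 : Int) (rows : List (List Int)) (z b : Int) :
    czlIdx n1 rows z (b + 1) = czlIdx n1 rows z b + 1 := by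
  induction rows generalizing z b with
  | nil => simp [czlIdx]
  | cons r rs ih =>
    simp only [czlIdx]
    split
    · split
      · rfl
      · exact ih _ _
    · exact ih _ _

theorem czlIdx_bounds (n1 : Int) (rows : List (List Int)) (z b : Int)
    (h0 : 0 ≤ z) (h1 : z < czlCnt n1 rows) :
    b < czlIdx n1 rows z b ∧ czlIdx n1 rows z b ≤ b + rows.length := by
  induction rows generalizing z b with
  | nil => rw [czlCnt_nil] at h1; omega
  | cons r rs ih =>
    rw [czlCnt_cons] at h1
    simp only [czlIdx]
    split
    · split
      · simp only [List.length_cons]; omega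
      · have := ih (z - 1) (b + 1) (by omega) (by split at h1 <;> simp_all <;> omega)
        simp only [List.length_cons]; omega
    · have := ih z (b + 1) h0 (by split at h1 <;> simp_all)
      simp only [List.length_cons]; omega

-- B's loop computes czlSet
theorem czlAltGo_eq (d1 n1 zn : Int) (rows : List (List Int)) (j : Int) :
    czlAltGo d1 n1 zn rows j = czlSet d1 n1 rows (zn - j - 1) := by
  induction rows generalizing j with
  | nil => simp [czlAltGo, czlSet]
  | cons r rs ih =>
    simp only [czlAltGo, czlSet]
    split
    · by_cases h : j + 1 = zn
      · rw [if_pos (by simpa using h), if_pos (by omega)]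
      · rw [if_neg (by simpa using h), if_neg (show ¬ zn - j - 1 = 0 by omega), ih]
        have : zn - (j + 1) - 1 = zn - j - 1 - 1 := by ring
        rw [this]
    · rw [ih]

theorem czl_pySetD_cons_succ (r : List Int) (rs : List (List Int)) (k : Nat) (w : List Int) :
    PySem.List.pySetD (r :: rs) ((k : Int) + 1) w = r :: PySem.List.pySetD rs (k : Int) w := by
  rw [show ((k : Int) + 1) = ((k + 1 : Nat) : Int) by push_cast; ring,
    PySem.List.pySetD_natCast, PySem.List.pySetD_natCast, List.set_cons_succ]

theorem czl_pyGetD_cons_succ (r : List Int) (rs : List (List Int)) (k : Nat) (d : List Int) :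
    PySem.List.pyGetD (r :: rs) ((k : Int) + 1) d = PySem.List.pyGetD rs (k : Int) d := by
  rw [show ((k : Int) + 1) = ((k + 1 : Nat) : Int) by push_cast; ring,
    PySem.List.pyGetD_natCast, PySem.List.pyGetD_natCast, List.getD_cons_succ]

-- A's final double assignment at the z-th zero index equals czlSet
theorem czlA_set_eq (d1 n1 : Int) (rows : List (List Int)) (z : Int)
    (h0 : 0 ≤ z) (h1 : z < czlCnt n1 rows) :
    PySem.List.pySetD rows (czlIdx n1 rows z (-1))
      (PySem.List.pySetD (PySem.List.pyGetD rows (czlIdx n1 rows z (-1)) []) n1 d1)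
      = czlSet d1 n1 rows z := by
  induction rows generalizing z with
  | nil => rw [czlCnt_nil] at h1; omega
  | cons r rs ih =>
    rw [czlCnt_cons] at h1
    by_cases hp : ((PySem.List.pyGet? r n1).getD 0 == 0) = true
    · by_cases hz : z = 0
      · subst hz
        rw [czlIdx_cons_pos0 n1 r rs (-1) hp, czlSet_cons_pos0 d1 n1 r rs hp]
        norm_num
        rw [show (0 : Int) = ((0 : Nat) : Int) from rfl, PySem.List.pySetD_natCast]
        simp
      · have hc : z - 1 < czlCnt n1 rs := by rw [if_pos hp] at h1; omega
        have hb := czlIdx_bounds n1 rs (z - 1) (-1) (by omega) hc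
        rw [czlIdx_cons_pos n1 r rs z (-1) hp hz, czlSet_cons_pos d1 n1 r rs z hp hz,
          czlIdx_shift]
        obtain ⟨m, hm⟩ : ∃ m : Nat, czlIdx n1 rs (z - 1) (-1) = (m : Int) :=
          ⟨(czlIdx n1 rs (z - 1) (-1)).toNat, by omega⟩
        rw [hm, czl_pySetD_cons_succ, czl_pyGetD_cons_succ, ← hm, ih (z - 1) (by omega) hc]
    · have hc : z < czlCnt n1 rs := by rw [if_neg hp] at h1; omega
      have hb := czlIdx_bounds n1 rs z (-1) h0 hc
      rw [czlIdx_cons_neg n1 r rs z (-1) hp, czlSet_cons_neg d1 n1 r rs z hp, czlIdx_shift]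
      obtain ⟨m, hm⟩ : ∃ m : Nat, czlIdx n1 rs z (-1) = (m : Int) :=
        ⟨(czlIdx n1 rs z (-1)).toNat, by omega⟩
      rw [hm, czl_pySetD_cons_succ, czl_pyGetD_cons_succ, ← hm, ih z h0 hc]

-- invariant of A's first loop
theorem czlFold_inv (n1 : Int) (rows : List (List Int)) :
    ∀ (c idx : Int) (dc : PySem.Dict Int Int),
    (∀ k ∈ PySem.Dict.keys dc, k ≤ c) → (PySem.Dict.keys dc).Nodup →
    (rows.foldl (czlF n1) (c, idx, dc)).1 = c + czlCnt n1 rows ∧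
    (∀ k ∈ PySem.Dict.keys (rows.foldl (czlF n1) (c, idx, dc)).2.2, k ≤ c + czlCnt n1 rows) ∧
    (PySem.Dict.keys (rows.foldl (czlF n1) (c, idx, dc)).2.2).Nodup ∧
    (∀ z : Int, z ≤ c →
      (z ∈ PySem.Dict.keys (rows.foldl (czlF n1) (c, idx, dc)).2.2 ↔ z ∈ PySem.Dict.keys dc) ∧
      PySem.Dict.getD (rows.foldl (czlF n1) (c, idx, dc)).2.2 z 0 = PySem.Dict.getD dc z 0) ∧
    (∀ z : Int, c < z → z ≤ c + czlCnt n1 rows →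
      z ∈ PySem.Dict.keys (rows.foldl (czlF n1) (c, idx, dc)).2.2 ∧
      PySem.Dict.getD (rows.foldl (czlF n1) (c, idx, dc)).2.2 z 0 = czlIdx n1 rows (z - c - 1) idx) := by
  induction rows with
  | nil =>
    intro c idx dc hle hnd
    refine ⟨by simp [czlCnt], by simpa [czlCnt] using hle, by simpa using hnd,
      by intro z _; exact ⟨Iff.rfl, rfl⟩, ?_⟩
    intro z hz1 hz2
    rw [czlCnt_nil] at hz2
    omega
  | cons r rs ih =>
    intro c idx dc hle hnd
    by_cases hp : ((PySem.List.pyGet? r n1).getD 0 == 0) = true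
    · have hstep : List.foldl (czlF n1) (c, idx, dc) (r :: rs)
        = List.foldl (czlF n1) (c + 1, idx + 1, PySem.Dict.insert dc (c + 1) (idx + 1)) rs := by
        simp [czlF, hp]
      have hnc : PySem.Dict.contains dc (c + 1) = false := by
        by_contra h
        have hmem : (c + 1) ∈ PySem.Dict.keys dc := by
          rw [← PySem.Dict.contains_iff_mem_keys]
          simpa using h
        have := hle _ hmem
        omega
      have hkeys : PySem.Dict.keys (PySem.Dict.insert dc (c + 1) (idx + 1))
          = PySem.Dict.keys dc ++ [c + 1] := PySem.Dict.keys_insert_of_not_contains _ _ hnc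
      have hle' : ∀ k ∈ PySem.Dict.keys (PySem.Dict.insert dc (c + 1) (idx + 1)), k ≤ c + 1 := by
        intro k hk
        rw [hkeys] at hk
        rcases List.mem_append.mp hk with h | h
        · have := hle _ h; omega
        · simp at h; omega
      have hnd' : (PySem.Dict.keys (PySem.Dict.insert dc (c + 1) (idx + 1))).Nodup := by
        rw [hkeys]
        refine List.Nodup.append hnd (by simp) ?_
        intro k hk hk2
        simp at hk2
        have := hle _ hk
        omega
      obtain ⟨ih1, ih2, ih3, ih4, ih5⟩ := ih (c + 1) (idx + 1) _ hle' hnd'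
      rw [hstep]
      have hcc : czlCnt n1 (r :: rs) = 1 + czlCnt n1 rs := by rw [czlCnt_cons, if_pos hp]
      refine ⟨by rw [ih1, hcc]; ring, by rw [hcc]; intro k hk; have := ih2 k hk; omega,
        ih3, ?_, ?_⟩
      · intro z hz
        obtain ⟨hmemiff, hgd⟩ := ih4 z (by omega)
        constructor
        · rw [hmemiff, hkeys]
          constructor
          · intro h
            rcases List.mem_append.mp h with h | h
            · exact h
            · simp at h; omega
          · intro h; exact List.mem_append.mpr (Or.inl h)
        · rw [hgd, PySem.Dict.getD_insert_of_ne]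
          omega
      · intro z hz1 hz2
        rw [hcc] at hz2
        by_cases hz : z = c + 1
        · subst hz
          obtain ⟨hmemiff, hgd⟩ := ih4 (c + 1) (by omega)
          refine ⟨hmemiff.mpr (by rw [hkeys]; simp), ?_⟩
          rw [hgd, PySem.Dict.getD_insert_self]
          rw [show c + 1 - c - 1 = 0 by ring, czlIdx_cons_pos0 n1 r rs idx hp]
        · obtain ⟨hmem, hgd⟩ := ih5 z (by omega) (by omega)
          refine ⟨hmem, ?_⟩
          rw [hgd, czlIdx_cons_pos n1 r rs (z - c - 1) idx hp (by omega)]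
          rw [show z - (c + 1) - 1 = z - c - 1 - 1 by ring]
    · have hstep : List.foldl (czlF n1) (c, idx, dc) (r :: rs)
        = List.foldl (czlF n1) (c, idx + 1, dc) rs := by
        simp [czlF, hp]
      obtain ⟨ih1, ih2, ih3, ih4, ih5⟩ := ih c (idx + 1) dc hle hnd
      rw [hstep]
      have hcc : czlCnt n1 (r :: rs) = czlCnt n1 rs := by
        rw [czlCnt_cons, if_neg hp]; ring
      refine ⟨by rw [ih1, hcc], by rw [hcc]; exact ih2, ih3, ih4, ?_⟩
      intro z hz1 hz2
      rw [hcc] at hz2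
      obtain ⟨hmem, hgd⟩ := ih5 z hz1 hz2
      refine ⟨hmem, ?_⟩
      rw [hgd, czlIdx_cons_neg n1 r rs (z - c - 1) idx hp]

-- picking by equality over a nodup key list is lookup
theorem czlPick_not_mem (z : Int) (g : Int → Int) (ks : List Int) :
    ∀ a : Int, z ∉ ks → ks.foldl (fun ch j => if j == z then g j else ch) a = a := by
  induction ks with
  | nil => intro a _; rfl
  | cons k ks ih =>
    intro a h
    simp only [List.mem_cons, not_or] at h
    simp only [List.foldl_cons]
    rw [if_neg (by simpa using fun e => h.1 e.symm)]
    exact ih a h.2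

theorem czlPick (z : Int) (g : Int → Int) (ks : List Int) :
    ∀ a : Int, ks.Nodup → z ∈ ks →
      ks.foldl (fun ch j => if j == z then g j else ch) a = g z := by
  induction ks with
  | nil => intro a _ hm; simp at hm
  | cons k ks ih =>
    intro a hnd hm
    simp only [List.foldl_cons]
    by_cases hk : k = z
    · subst hk
      rw [if_pos (by simp)]
      exact czlPick_not_mem _ _ _ _ (List.nodup_cons.mp hnd).1
    · rw [if_neg (by simpa using hk)]
      exact ih _ (List.nodup_cons.mp hnd).2 (by
        rcases List.mem_cons.mp hm with h | h
        · exact absurd h.symm hk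
        · exact h)

-- B's counting pass
theorem czlTot (n1 : Int) (rows : List (List Int)) :
    ∀ c : Int,
      rows.foldl (fun c r => if (PySem.List.pyGet? r n1).getD 0 == 0 then c + 1 else c) c
        = c + czlCnt n1 rows := by
  induction rows with
  | nil => intro c; simp [czlCnt]
  | cons r rs ih =>
    intro c
    rw [List.foldl_cons, czlCnt_cons]
    split
    · rw [ih]; ring
    · rw [ih]; ring

-- ===== VERDICT (by name: the statement is the Claim_ definition above) =====
theorem count_zero_left_spec : Claim_equal_count_zero_left := by
  intro mat k1 d1 n1 _ hpre
  obtain ⟨-, hcnt⟩ := hpre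
  have hcnt' : 0 < czlCnt n1 mat := by unfold czlCnt; exact_mod_cast hcnt
  obtain ⟨h1, -, hnd, -, h5⟩ := czlFold_inv n1 mat (-1) (-1) PySem.Dict.empty
    (by simp) (by simp)
  set st := mat.foldl (czlF n1) (-1, -1, PySem.Dict.empty) with hst
  have hm : st.1 + 1 = czlCnt n1 mat := by omega
  set z := PySem.Int.mod k1 (czlCnt n1 mat) with hz
  have hz0 : 0 ≤ z := PySem.Int.mod_nonneg k1 hcnt'
  have hz1 : z < czlCnt n1 mat := PySem.Int.mod_lt k1 hcnt'
  obtain ⟨hmem, hgd⟩ := h5 z (by omega) (by omega)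
  have hchange : (PySem.Dict.keys st.2.2).foldl
      (fun ch j => if j == z then PySem.Dict.getD st.2.2 j 0 else ch) 0
      = czlIdx n1 mat z (-1) := by
    rw [czlPick z (fun j => PySem.Dict.getD st.2.2 j 0) _ 0 hnd hmem]
    rw [hgd, show z - (-1) - 1 = z by ring]
  show count_zero_left mat k1 d1 n1 = count_zero_left_alt mat k1 d1 n1
  unfold count_zero_left count_zero_left_alt
  simp only []
  rw [← hst, hm, ← hz, hchange, czlA_set_eq d1 n1 mat z hz0 hz1,
    czlTot n1 mat 0, zero_add, ← hz, czlAltGo_eq d1 n1 z mat (-1),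
    show z - (-1) - 1 = z by ring]
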